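-- pv_equiv track=rewrite | github.com/Wyxbqsj/FairOptimalRidesharing | algorithms/newBFRM.py | is_stable_table
-- ===== SOURCE A (Python) =====
-- def is_stable_table(proposal_record):
--     proposers = set()
--     proposees = set()
--     for (proposee, proposer) in proposal_record.values():
--         if not proposee or not proposer:
--             return False
--         if (proposer in proposers) or (proposee in proposees):
--             return False
--
--         proposers.add(proposer)
--         proposees.add(proposee)
--
--     return True
-- ===== SOURCE B (Python) =====
-- def is_stable_table(proposal_record):
--     pairs = list(proposal_record.values())
--     proposees = [e for (e, _) in pairs]
--     proposers = [r for (_, r) in pairs]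
--     if not all(proposees) or not all(proposers):
--         return False
--     return len(set(proposers)) == len(pairs) and len(set(proposees)) == len(pairs)
-- ===== Notes on version B (the rewrite author's own statement) =====
-- stated objective: alternative
-- what changed: Replaces A's single loop with two growing sets and early returns by a staged, loop-free decomposition: project the two columns with comprehensions, reject falsy entries with all(), then decide uniqueness by comparing each column's set size with the record size.
import Mathlib
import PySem

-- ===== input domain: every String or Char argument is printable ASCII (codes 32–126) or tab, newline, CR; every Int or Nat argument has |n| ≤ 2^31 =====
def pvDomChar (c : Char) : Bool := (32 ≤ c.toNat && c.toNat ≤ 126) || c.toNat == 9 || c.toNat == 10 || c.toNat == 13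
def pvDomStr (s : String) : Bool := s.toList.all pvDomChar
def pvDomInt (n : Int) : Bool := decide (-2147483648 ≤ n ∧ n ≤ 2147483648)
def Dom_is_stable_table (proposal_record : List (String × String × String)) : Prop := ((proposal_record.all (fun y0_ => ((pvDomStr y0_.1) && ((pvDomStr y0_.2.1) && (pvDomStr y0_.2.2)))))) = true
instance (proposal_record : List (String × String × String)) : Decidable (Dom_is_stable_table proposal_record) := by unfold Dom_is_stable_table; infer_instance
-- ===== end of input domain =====

-- B replaces A's single loop with two growing sets and early returns by a staged, loop-free
-- decomposition: project the two columns, check truthiness with all, then compare set sizes.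


-- ===== PORT A =====
-- the for-loop over proposal_record.values() with the two set accumulators, early returns kept
def isStableGoA : List (String × String × String) → PySem.Set String → PySem.Set String → Bool
  | [], _, _ => true
  | (_, proposee, proposer) :: rest, proposers, proposees =>
    if proposee == "" || proposer == "" then false
    else if PySem.Set.contains proposers proposer || PySem.Set.contains proposees proposee then false
    else isStableGoA rest (PySem.Set.add proposers proposer) (PySem.Set.add proposees proposee)

def is_stable_table (proposal_record : List (String × String × String)) : Bool :=
  isStableGoA proposal_record PySem.Set.empty PySem.Set.empty

-- ===== PORT B =====
-- staged passes: project the two columns, falsiness check via all, then set-size comparison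
def is_stable_table_alt (proposal_record : List (String × String × String)) : Bool :=
  let pairs := proposal_record.map (fun t => (t.2.1, t.2.2))
  let proposees := pairs.map Prod.fst
  let proposers := pairs.map Prod.snd
  if !(proposees.all (fun s => !(s == ""))) || !(proposers.all (fun s => !(s == ""))) then
    false
  else
    ((PySem.Set.ofList proposers).length == pairs.length) &&
      ((PySem.Set.ofList proposees).length == pairs.length)

-- ===== PRECONDITION & SPEC =====
-- Python's proposal_record is a dict, which cannot hold duplicate keys; Pre_ excludes only
-- association lists with a repeated key, which do not correspond to any Python input.
def Pre_is_stable_table (proposal_record : List (String × String × String)) : Prop :=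
  (proposal_record.map Prod.fst).Nodup
instance (proposal_record : List (String × String × String)) : Decidable (Pre_is_stable_table proposal_record) := by unfold Pre_is_stable_table; infer_instance
def pvWitness_is_stable_table : (List (String × String × String)) := [("k1", "a", "x"), ("k2", "b", "y")]
def Spec_is_stable_table (proposal_record : List (String × String × String)) (out : Bool) : Prop := out = is_stable_table_alt proposal_record
instance (proposal_record : List (String × String × String)) (out : Bool) : Decidable (Spec_is_stable_table proposal_record out) := by unfold Spec_is_stable_table; infer_instance

-- ===== CLAIM (what is proved, stated in full; the proofs are below) =====
def Claim_equal_is_stable_table : Prop := ∀ (proposal_record : List (String × String × String)), Dom_is_stable_table proposal_record → Pre_is_stable_table proposal_record → Spec_is_stable_table proposal_record (is_stable_table proposal_record)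

-- ===== LEMMAS AND PROOFS =====

-- set(xs) is a sublist of xs
theorem ofList_sublist (xs : List String) : (PySem.Set.ofList xs).Sublist xs := by
  induction xs with
  | nil => simp [PySem.Set.ofList_nil]
  | cons x xs ih =>
    rw [PySem.Set.ofList_cons]
    refine List.Sublist.cons₂ _ (List.Sublist.trans ?_ ih)
    have : ∀ s : List String, (PySem.Set.discard s x).Sublist s := by
      intro s
      induction s with
      | nil => simp [PySem.Set.discard]
      | cons a s ihs =>
        simp only [PySem.Set.discard] at ihs ⊢
        rw [List.filter_cons]
        by_cases hax : (!a == x) = true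
        · rw [if_pos hax]; exact ihs.cons₂ a
        · rw [if_neg hax]; exact ihs.cons a
    exact this _

theorem length_ofList_eq_iff (xs : List String) :
    (PySem.Set.ofList xs).length = xs.length ↔ xs.Nodup := by
  constructor
  · intro h
    have hx := (ofList_sublist xs).eq_of_length h
    exact hx ▸ PySem.Set.nodup_ofList xs
  · intro h; rw [PySem.Set.ofList_eq_self_of_nodup xs h]

-- characterization of A's loop: it returns true iff no falsy entry and, together with the
-- accumulators, both columns are duplicate-free
theorem goA_iff (l : List (String × String × String)) :
    ∀ P Q : List String, P.Nodup → Q.Nodup →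
      (isStableGoA l P Q = true ↔
        (∀ t ∈ l, t.2.1 ≠ "" ∧ t.2.2 ≠ "") ∧
        (P ++ l.map (fun t => t.2.2)).Nodup ∧
        (Q ++ l.map (fun t => t.2.1)).Nodup) := by
  induction l with
  | nil =>
    intro P Q hP hQ
    simp [isStableGoA, hP, hQ]
  | cons t rest ih =>
    intro P Q hP hQ
    obtain ⟨k, proposee, proposer⟩ := t
    by_cases hf : (proposee == "" || proposer == "") = true
    · have hA : isStableGoA ((k, proposee, proposer) :: rest) P Q = false := by
        simp only [isStableGoA]; rw [if_pos hf]
      rw [hA]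
      constructor
      · intro h; cases h
      · rintro ⟨hall, -, -⟩
        have := hall (k, proposee, proposer) (List.mem_cons_self ..)
        rcases Bool.or_eq_true_iff.mp hf with h | h
        · exact absurd (beq_iff_eq.mp h) this.1
        · exact absurd (beq_iff_eq.mp h) this.2
    · by_cases hm : (PySem.Set.contains P proposer || PySem.Set.contains Q proposee) = true
      · have hA : isStableGoA ((k, proposee, proposer) :: rest) P Q = false := by
          simp only [isStableGoA]; rw [if_neg hf, if_pos hm]
        rw [hA]
        constructor
        · intro h; cases h
        · rintro ⟨-, hr, he⟩
          rcases Bool.or_eq_true_iff.mp hm with h | h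
          · have hmem : proposer ∈ P := (PySem.Set.contains_iff P proposer).mp h
            rw [List.nodup_append] at hr
            exact (hr.2.2 _ hmem _ (by simp) rfl).elim
          · have hmem : proposee ∈ Q := (PySem.Set.contains_iff Q proposee).mp h
            rw [List.nodup_append] at he
            exact (he.2.2 _ hmem _ (by simp) rfl).elim
      · have hr : proposer ∉ P := fun h =>
          hm (Bool.or_eq_true_iff.mpr (Or.inl ((PySem.Set.contains_iff P proposer).mpr h)))
        have he : proposee ∉ Q := fun h =>
          hm (Bool.or_eq_true_iff.mpr (Or.inr ((PySem.Set.contains_iff Q proposee).mpr h)))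
        have hA : isStableGoA ((k, proposee, proposer) :: rest) P Q
            = isStableGoA rest (PySem.Set.add P proposer) (PySem.Set.add Q proposee) := by
          simp only [isStableGoA]; rw [if_neg hf, if_neg hm]
        rw [hA, PySem.Set.add_of_not_mem hr, PySem.Set.add_of_not_mem he]
        have hPr : (P ++ [proposer]).Nodup := by
          rw [List.nodup_append]
          exact ⟨hP, List.nodup_singleton _, fun a ha b hb => by
            rw [List.mem_singleton] at hb; subst hb; exact fun h => hr (h ▸ ha)⟩
        have hQe : (Q ++ [proposee]).Nodup := by
          rw [List.nodup_append]
          exact ⟨hQ, List.nodup_singleton _, fun a ha b hb => by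
            rw [List.mem_singleton] at hb; subst hb; exact fun h => he (h ▸ ha)⟩
        rw [ih _ _ hPr hQe]
        have hne : proposee ≠ "" ∧ proposer ≠ "" := by
          simp only [Bool.or_eq_true, beq_iff_eq, not_or] at hf
          exact ⟨hf.1, hf.2⟩
        constructor
        · rintro ⟨hall, h1, h2⟩
          refine ⟨fun t ht => ?_, by simpa [List.append_assoc] using h1,
            by simpa [List.append_assoc] using h2⟩
          rcases List.mem_cons.mp ht with rfl | ht
          · exact hne
          · exact hall t ht
        · rintro ⟨hall, h1, h2⟩
          exact ⟨fun t ht => hall t (List.mem_cons_of_mem _ ht),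
            by simpa [List.append_assoc] using h1,
            by simpa [List.append_assoc] using h2⟩

-- characterization of B: same truth condition, via the set-size comparison
theorem alt_iff (l : List (String × String × String)) :
    (is_stable_table_alt l = true ↔
      (∀ t ∈ l, t.2.1 ≠ "" ∧ t.2.2 ≠ "") ∧
      (l.map (fun t => t.2.2)).Nodup ∧ (l.map (fun t => t.2.1)).Nodup) := by
  unfold is_stable_table_alt
  simp only [List.map_map]
  by_cases hall : ∀ t ∈ l, t.2.1 ≠ "" ∧ t.2.2 ≠ ""
  · have h1 : ((l.map (Prod.fst ∘ fun t => (t.2.1, t.2.2))).all (fun s => !(s == ""))) = true := by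
      simp only [List.all_eq_true]
      intro s hs
      simp only [List.mem_map] at hs
      obtain ⟨t, ht, rfl⟩ := hs
      simpa using (hall t ht).1
    have h2 : ((l.map (Prod.snd ∘ fun t => (t.2.1, t.2.2))).all (fun s => !(s == ""))) = true := by
      simp only [List.all_eq_true]
      intro s hs
      simp only [List.mem_map] at hs
      obtain ⟨t, ht, rfl⟩ := hs
      simpa using (hall t ht).2
    rw [h1, h2]
    simp only [Bool.not_true, Bool.or_self, Bool.false_eq_true, if_false,
      Bool.and_eq_true, beq_iff_eq, List.length_map]
    have e2 : (Prod.snd ∘ fun t : String × String × String => (t.2.1, t.2.2)) = fun t => t.2.2 := rfl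
    have e1 : (Prod.fst ∘ fun t : String × String × String => (t.2.1, t.2.2)) = fun t => t.2.1 := rfl
    rw [e1, e2]
    constructor
    · rintro ⟨ha, hb⟩
      exact ⟨hall, (length_ofList_eq_iff _).mp (by simpa using ha),
        (length_ofList_eq_iff _).mp (by simpa using hb)⟩
    · rintro ⟨-, ha, hb⟩
      exact ⟨by simpa using (length_ofList_eq_iff _).mpr ha,
        by simpa using (length_ofList_eq_iff _).mpr hb⟩
  · push Not at hall
    obtain ⟨t, ht, hbad⟩ := hall
    have hone : (!((l.map (Prod.fst ∘ fun t => (t.2.1, t.2.2))).all (fun s => !(s == ""))) ||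
        !((l.map (Prod.snd ∘ fun t => (t.2.1, t.2.2))).all (fun s => !(s == "")))) = true := by
      by_cases h1 : t.2.1 = ""
      · refine Bool.or_eq_true_iff.mpr (Or.inl ?_)
        simp only [Bool.not_eq_true', List.all_eq_false]
        exact ⟨t.2.1, List.mem_map.mpr ⟨t, ht, rfl⟩, by simp [h1]⟩
      · have h2 : t.2.2 = "" := by tauto
        refine Bool.or_eq_true_iff.mpr (Or.inr ?_)
        simp only [Bool.not_eq_true', List.all_eq_false]
        exact ⟨t.2.2, List.mem_map.mpr ⟨t, ht, rfl⟩, by simp [h2]⟩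
    rw [if_pos hone]
    constructor
    · intro h; cases h
    · rintro ⟨hall', -, -⟩
      exact ((hall' t ht).2 (hbad (hall' t ht).1)).elim

-- ===== VERDICT (by name: the statement is the Claim_ definition above) =====
theorem is_stable_table_spec : Claim_equal_is_stable_table := by
  intro pr _ _
  unfold Spec_is_stable_table
  have hA := goA_iff pr [] [] List.nodup_nil List.nodup_nil
  simp only [List.nil_append] at hA
  have hB := alt_iff pr
  unfold is_stable_table
  have hempty : isStableGoA pr PySem.Set.empty PySem.Set.empty = isStableGoA pr [] [] := rfl
  rw [hempty]
  cases hAv : isStableGoA pr [] [] with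
  | true => exact (hB.mpr (hA.mp hAv)).symm
  | false =>
    cases hBv : is_stable_table_alt pr with
    | true =>
      have := hA.mpr (hB.mp hBv)
      rw [hAv] at this; cases this
    | false => rfl
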